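-- pv_equiv track=rewrite | github.com/open-compass/VLMEvalKit | vlmeval/dataset/utils/mmhelix/evaluators/skyscrapers_evaluator.py | _count_visible_from_right
-- ===== SOURCE A (Python) =====
-- from typing import Dict, Any, Union, List
--
-- def _count_visible_from_right(grid: List[List[int]], row_idx: int) -> int:
--     """计算从右侧看某一行可见的摩天楼数量"""
--     visible_count = 0
--     max_height = 0
--     for col_idx in range(len(grid[row_idx]) - 1, -1, -1):
--         current_height = grid[row_idx][col_idx]
--         if current_height > max_height:
--             visible_count += 1
--             max_height = current_height
--     return visible_count
-- ===== SOURCE B (Python) =====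
-- def _count_visible_from_right(grid, row_idx):
--     row = grid[row_idx]
--     # build suffix-max table: suffix[i] = max(0, row[i+1], ..., row[-1])
--     suffix = []
--     m = 0
--     for h in reversed(row):
--         suffix.append(m)
--         m = max(m, h)
--     suffix.reverse()
--     # separate counting pass
--     return sum(h > s for h, s in zip(row, suffix))
-- ===== Notes on version B (the rewrite author's own statement) =====
-- stated objective: alternative
-- what changed: Replaces the single right-to-left scan carrying a (count, running-max) pair by two phases: first build a suffix-maximum table, then a separate forward counting pass comparing each element with its suffix maximum.
import Mathlib
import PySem

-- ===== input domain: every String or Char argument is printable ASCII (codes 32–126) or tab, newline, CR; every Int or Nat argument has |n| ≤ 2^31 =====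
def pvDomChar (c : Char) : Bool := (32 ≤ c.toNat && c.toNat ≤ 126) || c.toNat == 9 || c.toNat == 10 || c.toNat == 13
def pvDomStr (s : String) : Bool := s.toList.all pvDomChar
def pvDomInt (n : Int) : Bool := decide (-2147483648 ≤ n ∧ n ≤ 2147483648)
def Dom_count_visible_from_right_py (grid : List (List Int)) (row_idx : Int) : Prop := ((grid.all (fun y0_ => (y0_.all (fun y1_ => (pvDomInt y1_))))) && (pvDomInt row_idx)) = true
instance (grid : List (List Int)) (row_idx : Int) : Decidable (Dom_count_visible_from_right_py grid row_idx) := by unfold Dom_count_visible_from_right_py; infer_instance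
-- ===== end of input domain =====

-- B replaces A's single right-to-left (count, running-max) scan by a suffix-max table plus a
-- separate counting pass; same O(n) cost, different decomposition (objective: alternative).

-- ===== PORT A =====
def count_visible_from_right_py (grid : List (List Int)) (row_idx : Int) : Int :=
  let row := PySem.List.pyGetD grid row_idx []
  ((PySem.List.pyRange ((row.length : Int) - 1) (-1) (-1)).foldl
    (fun (st : Int × Int) col_idx =>
      let current := PySem.List.pyGetD row col_idx 0
      if current > st.2 then (st.1 + 1, current) else st)
    (0, 0)).1

-- ===== PORT B =====
def count_visible_from_right_py_alt (grid : List (List Int)) (row_idx : Int) : Int :=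
  let row := PySem.List.pyGetD grid row_idx []
  let p := row.reverse.foldl (fun (p : List Int × Int) h => (p.1 ++ [p.2], max p.2 h)) ([], 0)
  let suffix := p.1.reverse
  (((row.zip suffix).countP (fun q => decide (q.2 < q.1)) : Nat) : Int)

-- ===== PRECONDITION & SPEC =====
-- Pre_ excludes exactly the inputs where Python A raises IndexError on grid[row_idx].
def Pre_count_visible_from_right_py (grid : List (List Int)) (row_idx : Int) : Prop :=
  PySem.Raise.InRange grid.length row_idx
instance (grid : List (List Int)) (row_idx : Int) : Decidable (Pre_count_visible_from_right_py grid row_idx) := by unfold Pre_count_visible_from_right_py; infer_instance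
def pvWitness_count_visible_from_right_py : List (List Int) × Int := ([[2, 1, 3]], 0)
def Spec_count_visible_from_right_py (grid : List (List Int)) (row_idx : Int) (out : Int) : Prop := out = count_visible_from_right_py_alt grid row_idx
instance (grid : List (List Int)) (row_idx : Int) (out : Int) : Decidable (Spec_count_visible_from_right_py grid row_idx out) := by unfold Spec_count_visible_from_right_py; infer_instance

-- ===== CLAIM (what is proved, stated in full; the proofs are below) =====
def Claim_equal_count_visible_from_right_py : Prop := ∀ (grid : List (List Int)) (row_idx : Int), Dom_count_visible_from_right_py grid row_idx → Pre_count_visible_from_right_py grid row_idx → Spec_count_visible_from_right_py grid row_idx (count_visible_from_right_py grid row_idx)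

-- ===== LEMMAS AND PROOFS =====

-- The running prefix maxima (with floor m) along a traversal, in traversal order.
def pvEnt : Int → List Int → List Int
  | _, [] => []
  | m, h :: t => m :: pvEnt (max m h) t

theorem pvEnt_length (m : Int) (l : List Int) : (pvEnt m l).length = l.length := by
  induction l generalizing m with
  | nil => rfl
  | cons h t ih => simp [pvEnt, ih]

-- A's countdown range fold is a fold over the reversed row.
theorem pvFoldRange {β : Type} (l : List Int) (f : β → Int → β) (init : β) :
    (PySem.List.pyRange ((l.length : Int) - 1) (-1) (-1)).foldl
        (fun st j => f st (PySem.List.pyGetD l j 0)) init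
      = l.reverse.foldl f init := by
  rw [PySem.List.pyRange_neg_one_eq_reverse]
  rw [show (-1 : Int) + 1 = 0 from by norm_num,
      show ((l.length : Int) - 1) + 1 = (l.length : Int) from by ring]
  rw [← List.foldl_map (f := fun j => PySem.List.pyGetD l j 0) (g := f)]
  rw [List.map_reverse, PySem.List.map_pyGetD_pyRange_zero' l 0]

-- B's building fold produces the running-maxima table and the final maximum.
theorem pvBuild (l : List Int) (acc : List Int) (m : Int) :
    l.foldl (fun (p : List Int × Int) h => (p.1 ++ [p.2], max p.2 h)) (acc, m)
      = (acc ++ pvEnt m l, l.foldl max m) := by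
  induction l generalizing acc m with
  | nil => simp [pvEnt]
  | cons h t ih => simp [pvEnt, List.foldl_cons, ih]

-- A's scan counts exactly the positions beating their running maximum.
theorem pvKey (l : List Int) (c m : Int) :
    (l.foldl (fun (st : Int × Int) h => if h > st.2 then (st.1 + 1, h) else st) (c, m)).1
      = c + (((l.zip (pvEnt m l)).countP (fun q => decide (q.2 < q.1)) : Nat) : Int) := by
  induction l generalizing c m with
  | nil => simp [pvEnt]
  | cons h t ih =>
    by_cases hc : m < h
    · have hmax : max m h = h := max_eq_right (le_of_lt hc)
      simp only [pvEnt, List.zip_cons_cons, List.foldl_cons, List.countP_cons]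
      rw [if_pos (by exact hc), ih, hmax]
      simp [hc]
      omega
    · have hmax : max m h = m := max_eq_left (by omega)
      simp only [pvEnt, List.zip_cons_cons, List.foldl_cons, List.countP_cons]
      rw [if_neg (by exact hc), ih, hmax]
      simp [hc]

theorem pvZipRev {α β : Type} (xs : List α) (ys : List β) (h : xs.length = ys.length) :
    xs.reverse.zip ys.reverse = (xs.zip ys).reverse := by
  induction xs generalizing ys with
  | nil => cases ys with
    | nil => rfl
    | cons y ys => simp at h
  | cons x xs ih => cases ys with
    | nil => simp at h
    | cons y ys =>
      have hxy : xs.length = ys.length := by simpa using h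
      simp only [List.reverse_cons, List.zip_cons_cons]
      rw [List.zip_append (by simp [hxy]), ih ys hxy]
      simp

-- The two let-free port bodies agree on any row.
theorem pvMain (row : List Int) :
    ((PySem.List.pyRange ((row.length : Int) - 1) (-1) (-1)).foldl
        (fun (st : Int × Int) col_idx =>
          let current := PySem.List.pyGetD row col_idx 0
          if current > st.2 then (st.1 + 1, current) else st) (0, 0)).1
      = (((row.zip ((row.reverse.foldl
            (fun (p : List Int × Int) h => (p.1 ++ [p.2], max p.2 h)) ([], 0)).1.reverse)).countP
            (fun q => decide (q.2 < q.1)) : Nat) : Int) := by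
  simp only []
  rw [pvFoldRange row (fun (st : Int × Int) h => if h > st.2 then (st.1 + 1, h) else st) (0, 0)]
  rw [pvKey row.reverse 0 0, pvBuild row.reverse [] 0]
  simp only [List.nil_append]
  have hlen : row.reverse.length = (pvEnt 0 row.reverse).length := (pvEnt_length 0 row.reverse).symm
  have hz := pvZipRev row.reverse (pvEnt 0 row.reverse) hlen
  rw [List.reverse_reverse] at hz
  rw [hz, List.countP_reverse]
  omega

-- ===== VERDICT (by name: the statement is the Claim_ definition above) =====
theorem count_visible_from_right_py_spec : Claim_equal_count_visible_from_right_py := by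
  intro grid row_idx _ _
  unfold Spec_count_visible_from_right_py count_visible_from_right_py count_visible_from_right_py_alt
  exact pvMain (PySem.List.pyGetD grid row_idx [])
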